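-- pv_equiv track=rewrite | github.com/GDSC-Hanyang/Algorithm-1- | 조선빈/Lv.1/폰켓몬.py | solution
-- ===== SOURCE A (Python) =====
-- def solution(nums):
--     answer = 0
--     numA = []
--     for i in nums:
--         if i not in numA:
--             numA.append(i)
--     if len(nums)//2 > len(numA):
--         answer = len(numA)
--     else:
--         answer = len(nums)//2
--     return answer
-- ===== SOURCE B (Python) =====
-- def solution(nums):
--     s = sorted(nums)
--     distinct = 0
--     prev = None
--     for x in s:
--         if prev is None or x != prev:
--             distinct += 1
--         prev = x
--     return min(distinct, len(nums) // 2)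
-- ===== Notes on version B (the rewrite author's own statement) =====
-- stated objective: faster
-- what changed: Replaces A's repeated O(n) membership scans into a growing dedup list by a sort plus one adjacency pass counting distinct elements, then min(distinct, n//2).
import Mathlib
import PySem

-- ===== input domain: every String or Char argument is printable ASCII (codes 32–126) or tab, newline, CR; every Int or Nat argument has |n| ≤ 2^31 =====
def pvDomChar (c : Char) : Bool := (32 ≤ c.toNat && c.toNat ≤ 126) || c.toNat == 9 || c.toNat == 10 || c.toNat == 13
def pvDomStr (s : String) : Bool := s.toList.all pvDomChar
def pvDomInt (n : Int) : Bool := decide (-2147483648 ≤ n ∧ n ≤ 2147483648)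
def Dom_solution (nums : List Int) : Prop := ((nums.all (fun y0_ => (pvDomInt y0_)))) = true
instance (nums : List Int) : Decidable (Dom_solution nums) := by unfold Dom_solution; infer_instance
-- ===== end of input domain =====

-- B replaces A's quadratic membership-scan dedup by sort + one adjacency pass (objective: faster).

-- ===== PORT A =====
def solution (nums : List Int) : Int :=
  -- answer = 0; numA = []; for i in nums: if i not in numA: numA.append(i)
  let numA := nums.foldl (fun acc i => if i ∈ acc then acc else acc ++ [i]) ([] : List Int)
  if PySem.Int.floordiv (nums.length : Int) 2 > (numA.length : Int) then
    (numA.length : Int)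
  else
    PySem.Int.floordiv (nums.length : Int) 2

-- ===== PORT B =====
-- one iteration of B's loop body: state (prev, distinct)
def pvStepB (st : Option Int × Int) (x : Int) : Option Int × Int :=
  (some x, if (match st.1 with | none => true | some p => decide (x ≠ p)) then st.2 + 1 else st.2)

def solution_alt (nums : List Int) : Int :=
  let s := PySem.List.sorted nums (fun x => x) false
  -- distinct = 0; prev = None; for x in s: if prev is None or x != prev: distinct += 1; prev = x
  let st := s.foldl pvStepB ((none : Option Int), (0 : Int))
  min st.2 (PySem.Int.floordiv (nums.length : Int) 2)

-- ===== PRECONDITION & SPEC =====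
def Spec_solution (nums : List Int) (out : Int) : Prop := out = solution_alt nums
instance (nums : List Int) (out : Int) : Decidable (Spec_solution nums out) := by unfold Spec_solution; infer_instance

-- ===== CLAIM (what is proved, stated in full; the proofs are below) =====
def Claim_equal_solution : Prop := ∀ (nums : List Int), Dom_solution nums → Spec_solution nums (solution nums)

-- ===== LEMMAS AND PROOFS =====

-- A's accumulator stays duplicate-free and collects exactly the elements seen so far.
theorem pvA_fold_spec (l : List Int) (acc : List Int) (h : acc.Nodup) :
    (l.foldl (fun acc i => if i ∈ acc then acc else acc ++ [i]) acc).Nodup ∧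
    (l.foldl (fun acc i => if i ∈ acc then acc else acc ++ [i]) acc).toFinset
      = acc.toFinset ∪ l.toFinset := by
  induction l generalizing acc with
  | nil => simp [h]
  | cons a t ih =>
    simp only [List.foldl_cons]
    by_cases ha : a ∈ acc
    · rcases ih acc h with ⟨h1, h2⟩
      simp only [if_pos ha]
      refine ⟨h1, ?_⟩
      rw [h2]
      ext x
      simp only [Finset.mem_union, List.mem_toFinset, List.toFinset_cons, Finset.mem_insert]
      constructor
      · tauto
      · rintro (h | h | h) <;> first | exact Or.inl h | (subst h; exact Or.inl ha) | exact Or.inr h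
    · have hnd : (acc ++ [a]).Nodup := by
        rw [List.nodup_append]
        refine ⟨h, List.nodup_singleton a, ?_⟩
        intro x hx b hb
        rw [List.mem_singleton] at hb
        subst hb
        exact fun he => ha (he ▸ hx)
      rcases ih (acc ++ [a]) hnd with ⟨h1, h2⟩
      simp only [if_neg ha]
      refine ⟨h1, ?_⟩
      rw [h2]
      ext x
      simp only [Finset.mem_union, List.mem_toFinset, List.mem_append, List.mem_singleton,
        List.toFinset_cons, Finset.mem_insert]
      tauto

-- B's adjacency pass, started after an element p that lower-bounds the sorted rest.
theorem pvB_fold_spec (l : List Int) (p : Int) (c : Int)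
    (hs : l.Pairwise (· ≤ ·)) (hp : ∀ x ∈ l, p ≤ x) :
    (l.foldl pvStepB ((some p : Option Int), c)).2 = c + ((l.toFinset).erase p).card := by
  induction l generalizing p c with
  | nil => simp
  | cons a t ih =>
    have hpa : p ≤ a := hp a (List.mem_cons_self ..)
    have hta : ∀ x ∈ t, a ≤ x := (List.pairwise_cons.mp hs).1
    have hst : t.Pairwise (· ≤ ·) := (List.pairwise_cons.mp hs).2
    simp only [List.foldl_cons]
    by_cases hap : a = p
    · subst hap
      rw [show pvStepB (some a, c) a = (some a, c) by simp [pvStepB]]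
      rw [ih a c hst hta]
      have he : ((a :: t).toFinset).erase a = (t.toFinset).erase a := by
        ext x
        simp only [Finset.mem_erase, List.toFinset_cons, Finset.mem_insert, List.mem_toFinset]
        tauto
      rw [he]
    · have hlt : p < a := lt_of_le_of_ne hpa (fun h => hap h.symm)
      rw [show pvStepB (some p, c) a = (some a, c + 1) by simp [pvStepB, hap]]
      rw [ih a (c + 1) hst hta]
      have hpn : p ∉ insert a t.toFinset := by
        simp only [Finset.mem_insert, List.mem_toFinset]
        rintro (h | h)
        · exact absurd h (ne_of_lt hlt)
        · exact absurd (hta p h) (not_le.mpr hlt)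
      have h1 : ((a :: t).toFinset).erase p = insert a t.toFinset := by
        rw [List.toFinset_cons, Finset.erase_eq_of_notMem hpn]
      rw [h1]
      have h2 : insert a t.toFinset = insert a (t.toFinset.erase a) := by
        ext x
        simp only [Finset.mem_insert, Finset.mem_erase]
        constructor
        · rintro (h | h)
          · exact Or.inl h
          · by_cases hx : x = a
            · exact Or.inl hx
            · exact Or.inr ⟨hx, h⟩
        · rintro (h | ⟨_, h⟩)
          · exact Or.inl h
          · exact Or.inr h
      rw [h2, Finset.card_insert_of_notMem (Finset.notMem_erase a _)]
      push_cast
      ring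

-- A's dedup length equals the number of distinct elements.
theorem pvA_len (nums : List Int) :
    (nums.foldl (fun acc i => if i ∈ acc then acc else acc ++ [i]) ([] : List Int)).length
      = nums.toFinset.card := by
  rcases pvA_fold_spec nums [] List.nodup_nil with ⟨h1, h2⟩
  rw [← List.toFinset_card_of_nodup h1, h2]
  simp

-- B's pass counts the number of distinct elements.
theorem pvB_count (nums : List Int) :
    ((PySem.List.sorted nums (fun x => x) false).foldl pvStepB
      ((none : Option Int), (0 : Int))).2 = (nums.toFinset.card : Int) := by
  have hperm : (PySem.List.sorted nums (fun x => x) false).Perm nums := PySem.List.sorted_perm ..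
  have htf : (PySem.List.sorted nums (fun x => x) false).toFinset = nums.toFinset := by
    ext x; simp [List.mem_toFinset, hperm.mem_iff]
  have hpw : (PySem.List.sorted nums (fun x => x) false).Pairwise (· ≤ ·) := by
    have := PySem.List.sorted_pairwise (xs := nums) (key := fun x => x)
    simpa using this
  rw [← htf]
  cases hsl : PySem.List.sorted nums (fun x => x) false with
  | nil => simp
  | cons a t =>
    rw [hsl] at hpw
    have hta : ∀ x ∈ t, a ≤ x := (List.pairwise_cons.mp hpw).1
    have hst : t.Pairwise (· ≤ ·) := (List.pairwise_cons.mp hpw).2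
    simp only [List.foldl_cons]
    rw [show pvStepB (none, 0) a = (some a, 0 + 1) by simp [pvStepB]]
    rw [pvB_fold_spec t a (0 + 1) hst hta]
    have h2 : insert a t.toFinset = insert a (t.toFinset.erase a) := by
      ext x
      simp only [Finset.mem_insert, Finset.mem_erase]
      constructor
      · rintro (h | h)
        · exact Or.inl h
        · by_cases hx : x = a
          · exact Or.inl hx
          · exact Or.inr ⟨hx, h⟩
      · rintro (h | ⟨_, h⟩)
        · exact Or.inl h
        · exact Or.inr h
    rw [List.toFinset_cons, h2, Finset.card_insert_of_notMem (Finset.notMem_erase a _)]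
    push_cast
    ring

-- ===== VERDICT (by name: the statement is the Claim_ definition above) =====
theorem solution_spec : Claim_equal_solution := by
  intro nums _
  unfold Spec_solution solution solution_alt
  simp only []
  rw [pvB_count, pvA_len]
  by_cases h : PySem.Int.floordiv (nums.length : Int) 2 > (nums.toFinset.card : Int)
  · rw [if_pos h, min_eq_left (le_of_lt h)]
  · rw [if_neg h, min_eq_right (not_lt.mp h)]
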